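-- pv_equiv track=rewrite | github.com/jiwonniddaaa/programmers-2408 | 귤 고르기_조준형.py | solution
-- ===== SOURCE A (Python) =====
-- def solution(k, tangerine):
--     # 1. 귤의 크기별 빈도 세기
--     size_count = {}
--     for size in tangerine:
--         if size in size_count:
--             size_count[size] += 1
--         else:
--             size_count[size] = 1
--
--     # 2. 빈도 기준으로 내림차순 정렬
--     sorted_count = sorted(size_count.values(), reverse=True)
--
--     # 3. k개의 귤을 고를 때 크기 종류의 최소화
--     types = 0
--     for count in sorted_count:
--         k -= count
--         types += 1
--         if k <= 0:
--             break
--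
--     return types
-- ===== SOURCE B (Python) =====
-- def solution(k, tangerine):
--     # counting-sort variant: bucket frequencies instead of comparison-sorting them
--     size_count = {}
--     for size in tangerine:
--         size_count[size] = size_count.get(size, 0) + 1
--     n = len(tangerine)
--     bucket = [0] * (n + 1)   # bucket[f] = number of distinct sizes occurring exactly f times
--     for c in size_count.values():
--         bucket[c] += 1
--     types = 0
--     for f in range(n, 0, -1):
--         for _ in range(bucket[f]):
--             types += 1
--             k -= f
--             if k <= 0:
--                 return types
--     return types
-- ===== Notes on version B (the rewrite author's own statement) =====
-- stated objective: alternative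
-- what changed: B replaces A's comparison sort of the frequency values (sorted(..., reverse=True)) by a counting sort: it buckets the frequencies into bucket[f] = number of distinct sizes occurring exactly f times and scans the buckets from the highest frequency down, so the greedy loop runs over buckets instead of a sorted list.
import Mathlib
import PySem

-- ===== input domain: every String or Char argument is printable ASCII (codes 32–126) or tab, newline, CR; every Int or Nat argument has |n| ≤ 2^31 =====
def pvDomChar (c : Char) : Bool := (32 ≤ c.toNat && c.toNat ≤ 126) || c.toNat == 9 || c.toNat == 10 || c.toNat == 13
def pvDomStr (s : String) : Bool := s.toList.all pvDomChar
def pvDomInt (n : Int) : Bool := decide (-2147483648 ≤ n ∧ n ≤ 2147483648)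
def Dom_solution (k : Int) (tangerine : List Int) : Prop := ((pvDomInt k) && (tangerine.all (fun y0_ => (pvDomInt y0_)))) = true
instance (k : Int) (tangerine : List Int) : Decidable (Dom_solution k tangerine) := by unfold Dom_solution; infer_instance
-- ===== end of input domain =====

-- B replaces A's comparison sort of the frequency values by a counting sort over
-- frequency buckets scanned from the highest frequency down (objective: alternative).

-- ===== PORT A =====
-- the 'for count in sorted_count' loop with its break
def solutionLoopA (k types : Int) : List Int → Int
  | [] => types
  | c :: rest =>
    if k - c ≤ 0 then types + 1 else solutionLoopA (k - c) (types + 1) rest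

def solution (k : Int) (tangerine : List Int) : Int :=
  let size_count := tangerine.foldl
    (fun d size => if d.contains size then d.modify size 0 (· + 1) else d.insert size (1:Int))
    PySem.Dict.empty
  let sorted_count := PySem.List.sorted size_count.values (fun x => x) true
  solutionLoopA k 0 sorted_count

-- ===== PORT B =====
-- the inner 'for _ in range(bucket[f])' loop; inl = early return, inr = updated (k, types)
def solutionInnerB (f k types : Int) : Nat → (Int ⊕ (Int × Int))
  | 0 => Sum.inr (k, types)
  | m+1 =>
    if k - f ≤ 0 then Sum.inl (types + 1) else solutionInnerB f (k - f) (types + 1) m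

-- the outer 'for f in range(n, 0, -1)' loop (f counts down)
def solutionOuterB (bucket : List Int) (k types : Int) : Nat → Int
  | 0 => types
  | f+1 =>
    match solutionInnerB ((f : Int)+1) k types (bucket.getD (f+1) 0).toNat with
    | Sum.inl r => r
    | Sum.inr (k', t') => solutionOuterB bucket k' t' f

def solution_alt (k : Int) (tangerine : List Int) : Int :=
  let size_count := tangerine.foldl
    (fun d size => d.insert size (d.getD size (0:Int) + 1)) PySem.Dict.empty
  let n := tangerine.length
  let bucket := size_count.values.foldl
    (fun b c => b.set c.toNat (b.getD c.toNat 0 + 1)) (List.replicate (n+1) (0:Int))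
  solutionOuterB bucket k 0 n

-- ===== PRECONDITION & SPEC =====
def Spec_solution (k : Int) (tangerine : List Int) (out : Int) : Prop := out = solution_alt k tangerine
instance (k : Int) (tangerine : List Int) (out : Int) : Decidable (Spec_solution k tangerine out) := by unfold Spec_solution; infer_instance

-- ===== CLAIM (what is proved, stated in full; the proofs are below) =====
def Claim_equal_solution : Prop := ∀ (k : Int) (tangerine : List Int), Dom_solution k tangerine → Spec_solution k tangerine (solution k tangerine)

-- ===== LEMMAS AND PROOFS =====

-- A's counting loop builds Counter(tangerine)
lemma dictA_eq_counter (xs : List Int) :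
    xs.foldl (fun d size => if d.contains size then d.modify size 0 (· + 1) else d.insert size (1:Int))
      PySem.Dict.empty = PySem.Dict.counter xs := by
  have hstep : ∀ (d : PySem.Dict Int Int) (x : Int),
      (if d.contains x then d.modify x 0 (· + 1) else d.insert x (1:Int)) = d.modify x 0 (· + 1) := by
    intro d x
    split
    · rfl
    · next h =>
      simp [PySem.Dict.modify, PySem.Dict.insert, h]
      rw [PySem.Dict.getD_of_not_contains]
      simpa using h
  rw [PySem.Dict.counter_eq_foldl]
  have : (fun (d : PySem.Dict Int Int) (x : Int) =>
      if d.contains x then d.modify x 0 (· + 1) else d.insert x (1:Int))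
      = fun d x => d.modify x 0 (· + 1) := funext fun d => funext fun x => hstep d x
  rw [this]

-- B's counting loop builds the same Counter
lemma dictB_eq_counter (xs : List Int) :
    xs.foldl (fun d size => d.insert size (d.getD size (0:Int) + 1)) PySem.Dict.empty
      = PySem.Dict.counter xs :=
  PySem.Dict.foldl_insert_getD_add_one_eq_counter xs

-- the common frequency multiset
def freqVals (xs : List Int) : List Int := (PySem.Dict.counter xs).values

lemma freqVals_eq (xs : List Int) :
    freqVals xs = (PySem.Set.ofList xs).map (fun v => (xs.count v : Int)) := by
  unfold freqVals
  show (PySem.Dict.counter xs).items.map (·.2) = _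
  rw [PySem.Dict.items_counter]
  simp

lemma freqVals_bounds (xs : List Int) : ∀ c ∈ freqVals xs, 1 ≤ c ∧ c ≤ (xs.length : Int) := by
  rw [freqVals_eq]
  intro c hc
  rcases List.mem_map.mp hc with ⟨v, hv, rfl⟩
  have hmem : v ∈ xs := (PySem.Set.mem_ofList xs v).mp hv
  have h1 : 1 ≤ xs.count v := List.count_pos_iff.mpr hmem
  have h2 : xs.count v ≤ xs.length := List.count_le_length
  constructor <;> [exact_mod_cast h1; exact_mod_cast h2]

-- the bucket array counts the frequency values
lemma bucket_getD (l b : List Int) (n j : Nat) (hb : b.length = n+1)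
    (hl : ∀ c ∈ l, 1 ≤ c ∧ c ≤ (n:Int)) (hj : j ≤ n) :
    (l.foldl (fun b c => b.set c.toNat (b.getD c.toNat 0 + 1)) b).getD j 0
      = b.getD j 0 + l.count (j:Int) := by
  induction l generalizing b with
  | nil => simp
  | cons c l ih =>
    have hc := hl c (List.mem_cons_self ..)
    have hlen : (b.set c.toNat (b.getD c.toNat 0 + 1)).length = n + 1 := by
      rw [List.length_set, hb]
    rw [List.foldl_cons, ih _ hlen (fun x hx => hl x (List.mem_cons_of_mem _ hx))]
    have hset : ∀ (i : Nat), i ≤ n →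
        (b.set c.toNat (b.getD c.toNat 0 + 1)).getD i 0
          = if c.toNat = i then b.getD c.toNat 0 + 1 else b.getD i 0 := by
      intro i hi
      rw [List.getD_eq_getElem?_getD, List.getElem?_set]
      split
      · next h =>
        subst h
        rw [if_pos (show c.toNat < b.length by rw [hb]; omega), Option.getD_some]
      · rw [List.getD_eq_getElem?_getD]
    rw [hset j hj, List.count_cons]
    by_cases h : c.toNat = j
    · have : c = (j : Int) := by omega
      subst this
      simp [h]
      omega
    · have : ¬ (c = (j : Int)) := by omega
      simp [h, this]

-- the descending sequence of counts that B's nested loops traverse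
def descSeq (bucket : List Int) : Nat → List Int
  | 0 => []
  | f+1 => List.replicate (bucket.getD (f+1) 0).toNat ((f:Int)+1) ++ descSeq bucket f

lemma count_descSeq (bucket : List Int) (n : Nat) (a : Int) :
    (descSeq bucket n).count a
      = if 1 ≤ a ∧ a ≤ (n:Int) then (bucket.getD a.toNat 0).toNat else 0 := by
  induction n with
  | zero =>
    simp only [descSeq, List.count_nil]
    rw [if_neg (by push_cast; omega)]
  | succ n ih =>
    unfold descSeq
    rw [List.count_append, List.count_replicate, ih]
    simp only [beq_iff_eq]
    push_cast
    by_cases h : a = (n : Int) + 1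
    · subst h
      rw [show ((n:Int) + 1).toNat = n + 1 from by omega]
      split_ifs <;> omega
    · split_ifs <;> omega

lemma mem_descSeq_le (bucket : List Int) (f : Nat) :
    ∀ x ∈ descSeq bucket f, x ≤ (f:Int) := by
  induction f with
  | zero => simp [descSeq]
  | succ f ih =>
    intro x hx
    rcases List.mem_append.mp hx with h | h
    · rcases List.eq_of_mem_replicate h with rfl; push_cast; omega
    · have := ih x h; push_cast; push_cast at this; omega

lemma pairwise_descSeq (bucket : List Int) (f : Nat) :
    (descSeq bucket f).Pairwise (· ≥ ·) := by
  induction f with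
  | zero => simp [descSeq]
  | succ f ih =>
    unfold descSeq
    rw [List.pairwise_append]
    refine ⟨List.pairwise_replicate.mpr (Or.inr le_rfl), ih, ?_⟩
    intro a ha b hb
    rcases List.eq_of_mem_replicate ha with rfl
    have := mem_descSeq_le bucket f b hb
    omega

-- the inner loop is loopA on a replicate block
lemma innerB_loopA (f : Int) (rest : List Int) : ∀ (m : Nat) (k t : Int),
    solutionLoopA k t (List.replicate m f ++ rest)
      = match solutionInnerB f k t m with
        | Sum.inl r => r
        | Sum.inr (k', t') => solutionLoopA k' t' rest := by
  intro m
  induction m with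
  | zero => intro k t; simp [List.replicate, solutionInnerB]
  | succ m ih =>
    intro k t
    rw [List.replicate_succ, List.cons_append]
    show (if k - f ≤ 0 then t + 1 else solutionLoopA (k - f) (t + 1) (List.replicate m f ++ rest)) = _
    unfold solutionInnerB
    split
    · rfl
    · exact ih (k - f) (t + 1)

-- the outer loop is loopA on descSeq
lemma outerB_loopA (bucket : List Int) : ∀ (f : Nat) (k t : Int),
    solutionOuterB bucket k t f = solutionLoopA k t (descSeq bucket f) := by
  intro f
  induction f with
  | zero => intro k t; rfl
  | succ f ih =>
    intro k t
    unfold solutionOuterB descSeq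
    rw [innerB_loopA]
    cases h : solutionInnerB ((f : Int) + 1) k t ((bucket.getD (f+1) 0).toNat) with
    | inl r => rfl
    | inr p => exact ih p.1 p.2

-- descSeq of B's bucket is exactly A's descending sort of the frequency values
lemma descSeq_eq_sorted (xs : List Int) :
    descSeq ((freqVals xs).foldl (fun b c => b.set c.toNat (b.getD c.toNat 0 + 1))
        (List.replicate (xs.length+1) (0:Int))) xs.length
      = PySem.List.sorted (freqVals xs) (fun x => x) true := by
  have hbounds := freqVals_bounds xs
  have hcount : ∀ a : Int,
      (descSeq ((freqVals xs).foldl (fun b c => b.set c.toNat (b.getD c.toNat 0 + 1))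
        (List.replicate (xs.length+1) (0:Int))) xs.length).count a = (freqVals xs).count a := by
    intro a
    rw [count_descSeq]
    by_cases h : 1 ≤ a ∧ a ≤ (xs.length : Int)
    · rw [if_pos h]
      rw [bucket_getD (freqVals xs) _ xs.length a.toNat (by simp) hbounds (by omega)]
      have ha : ((a.toNat : Nat) : Int) = a := by omega
      rw [ha]
      simp only [List.getD_eq_getElem?_getD, List.getElem?_replicate]
      rw [if_pos (by omega)]
      simp
    · rw [if_neg h]
      symm
      rw [List.count_eq_zero]
      intro hmem
      have := hbounds a hmem
      omega
  have hperm : (descSeq ((freqVals xs).foldl (fun b c => b.set c.toNat (b.getD c.toNat 0 + 1))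
        (List.replicate (xs.length+1) (0:Int))) xs.length).Perm
      (PySem.List.sorted (freqVals xs) (fun x => x) true) :=
    (List.perm_iff_count.mpr hcount).trans
      (PySem.List.sorted_perm (freqVals xs) (fun x => x) true).symm
  exact hperm.eq_of_pairwise (fun a b _ _ h1 h2 => le_antisymm h2 h1) (pairwise_descSeq _ _)
    ((PySem.List.sorted_pairwise_rev (freqVals xs) (fun x => x)).imp (fun h => h))

-- ===== VERDICT (by name: the statement is the Claim_ definition above) =====
theorem solution_spec : Claim_equal_solution := by
  intro k tangerine _
  unfold Spec_solution solution solution_alt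
  simp only [dictA_eq_counter, dictB_eq_counter]
  rw [outerB_loopA]
  rw [show (PySem.Dict.counter tangerine).values = freqVals tangerine from rfl]
  rw [descSeq_eq_sorted]
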